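-- pv_equiv track=rewrite | github.com/cmsjade5000/ORION | scripts/notify_inbox_results.py | _extract_send_ready_telegram_message
-- ===== SOURCE A (Python) =====
-- SEND_READY_HEADERS = {
--     "TELEGRAM_MESSAGE:",
--     "SLACK_MESSAGE:",
--     "EMAIL_SUBJECT:",
--     "INTERNAL:",
-- }
--
-- def _extract_send_ready_telegram_message(preview_lines: list[str]) -> str | None:
--     """
--     Return the body of a SCRIBE-style Telegram draft, excluding internal handoff
--     markers such as `Status: OK` and `TELEGRAM_MESSAGE:`.
--     """
--     start: int | None = None
--     for idx, raw in enumerate(preview_lines):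
--         if raw.strip() == "TELEGRAM_MESSAGE:":
--             start = idx + 1
--             break
--     if start is None:
--         return None
--
--     body: list[str] = []
--     for raw in preview_lines[start:]:
--         line = raw.rstrip()
--         if line.strip() in SEND_READY_HEADERS:
--             break
--         body.append(line)
--
--     text = "\n".join(body).strip()
--     return text or None
-- ===== SOURCE B (Python) =====
-- SEND_READY_HEADERS = {
--     "TELEGRAM_MESSAGE:",
--     "SLACK_MESSAGE:",
--     "EMAIL_SUBJECT:",
--     "INTERNAL:",
-- }
--
-- def _extract_send_ready_telegram_message(preview_lines):
--     # Single REVERSE pass, building segments back-to-front: `seg` holds the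
--     # (rstripped) lines since the last header seen while walking backwards, so
--     # when we meet a "TELEGRAM_MESSAGE:" header, `seg` is exactly the body
--     # between that marker and the next header below it; overwriting `ans` at
--     # every marker makes the FIRST marker in document order win.
--     ans = None
--     seg = []
--     for raw in reversed(preview_lines):
--         s = raw.strip()
--         if s in SEND_READY_HEADERS:
--             if s == "TELEGRAM_MESSAGE:":
--                 ans = seg[::-1]
--             seg = []
--         else:
--             seg.append(raw.rstrip())
--     if ans is None:
--         return None
--     text = "\n".join(ans).strip()
--     return text or None
-- ===== Notes on version B (the rewrite author's own statement) =====
-- stated objective: alternative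
-- what changed: Traverses the lines in REVERSE in a single pass, accumulating the lines since the last header as a back-to-front segment and capturing it whenever the TELEGRAM_MESSAGE: marker is met (later captures, i.e. earlier markers, overwrite), instead of A's forward search for the marker index followed by a slice-and-scan.
import Mathlib
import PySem

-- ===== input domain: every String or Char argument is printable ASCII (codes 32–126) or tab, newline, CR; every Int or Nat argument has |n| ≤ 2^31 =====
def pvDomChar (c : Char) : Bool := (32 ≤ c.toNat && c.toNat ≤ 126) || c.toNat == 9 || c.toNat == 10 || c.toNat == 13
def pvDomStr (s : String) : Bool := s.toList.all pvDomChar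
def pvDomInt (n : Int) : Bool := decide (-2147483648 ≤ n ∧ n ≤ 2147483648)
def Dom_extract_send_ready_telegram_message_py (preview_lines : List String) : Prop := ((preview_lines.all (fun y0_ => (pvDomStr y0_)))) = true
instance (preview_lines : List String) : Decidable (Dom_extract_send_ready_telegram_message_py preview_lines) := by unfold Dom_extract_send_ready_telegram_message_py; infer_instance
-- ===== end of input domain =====

-- B replaces A's forward "find marker index, then slice and rescan" with a single
-- REVERSE pass that accumulates the segment since the last header back-to-front
-- and captures it at each TELEGRAM_MESSAGE: marker (objective: alternative).

-- ===== PORT A =====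
def pvHeaders : PySem.Set String :=
  PySem.Set.ofList ["TELEGRAM_MESSAGE:", "SLACK_MESSAGE:", "EMAIL_SUBJECT:", "INTERNAL:"]

-- first loop of A: `for idx, raw in enumerate(...)` with break, returning `start`
def pvFindStartA : List String → Nat → Option Nat
  | [], _ => none
  | raw :: rest, idx =>
    if PySem.Str.strip raw = "TELEGRAM_MESSAGE:" then some (idx + 1)
    else pvFindStartA rest (idx + 1)

-- second loop of A over `preview_lines[start:]` with break
def pvBodyA : List String → List String
  | [] => []
  | raw :: rest =>
    let line := PySem.Str.rstrip raw
    if PySem.Set.contains pvHeaders (PySem.Str.strip line) then []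
    else line :: pvBodyA rest

def extract_send_ready_telegram_message_py (preview_lines : List String) : Option String :=
  match pvFindStartA preview_lines 0 with
  | none => none
  | some start =>
    let body := pvBodyA (PySem.List.slice preview_lines (some (start : Int)) none)
    let text := PySem.Str.strip (PySem.Str.join "\n" body)
    if text = "" then none else some text

-- ===== PORT B =====
-- body of B's single `for raw in reversed(preview_lines)` loop; state = (seg, ans)
def pvStepB (st : List String × Option (List String)) (raw : String) :
    List String × Option (List String) :=
  let s := PySem.Str.strip raw
  if PySem.Set.contains pvHeaders s then
    if s = "TELEGRAM_MESSAGE:" then ([], some st.1.reverse)   -- seg[::-1]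
    else ([], st.2)
  else (st.1 ++ [PySem.Str.rstrip raw], st.2)                  -- seg.append(...)

def extract_send_ready_telegram_message_py_alt (preview_lines : List String) : Option String :=
  let st := preview_lines.reverse.foldl pvStepB ([], none)
  match st.2 with
  | none => none
  | some body =>
    let text := PySem.Str.strip (PySem.Str.join "\n" body)
    if text = "" then none else some text

-- ===== PRECONDITION & SPEC =====
def Spec_extract_send_ready_telegram_message_py (preview_lines : List String) (out : Option String) : Prop := out = extract_send_ready_telegram_message_py_alt preview_lines
instance (preview_lines : List String) (out : Option String) : Decidable (Spec_extract_send_ready_telegram_message_py preview_lines out) := by unfold Spec_extract_send_ready_telegram_message_py; infer_instance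

-- ===== CLAIM =====
def Claim_equal_extract_send_ready_telegram_message_py : Prop := ∀ (preview_lines : List String), Dom_extract_send_ready_telegram_message_py preview_lines → Spec_extract_send_ready_telegram_message_py preview_lines (extract_send_ready_telegram_message_py preview_lines)

-- ===== LEMMAS AND PROOFS =====

-- rstrip keeps a non-space head
theorem rstrip_cons_not (x : Char) (xs : List Char) (h : PySem.Chars.isspace x = false) :
    PySem.Chars.rstrip (x :: xs) = x :: PySem.Chars.rstrip xs := by
  simp [PySem.Chars.rstrip, List.dropWhile_append]
  intro h'
  have hd : List.dropWhile PySem.Chars.isspace xs.reverse = [] :=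
    List.dropWhile_eq_nil_iff.mpr (by simpa using h')
  simp [hd, List.dropWhile, h]

-- rstrip with a space head: the head survives iff anything does
theorem rstrip_cons_space (x : Char) (xs : List Char) (h : PySem.Chars.isspace x = true) :
    PySem.Chars.rstrip (x :: xs) =
      if PySem.Chars.rstrip xs = [] then [] else x :: PySem.Chars.rstrip xs := by
  simp only [PySem.Chars.rstrip, List.reverse_cons, List.dropWhile_append]
  by_cases h' : List.dropWhile PySem.Chars.isspace xs.reverse = []
  · simp [h', h]
  · simp [h']

theorem rstrip_eq_nil_iff (l : List Char) :
    PySem.Chars.rstrip l = [] ↔ ∀ x ∈ l, PySem.Chars.isspace x = true := by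
  simp [PySem.Chars.rstrip, List.dropWhile_eq_nil_iff]

theorem rstrip_idem (l : List Char) :
    PySem.Chars.rstrip (PySem.Chars.rstrip l) = PySem.Chars.rstrip l := by
  simp [PySem.Chars.rstrip, List.dropWhile_idempotent]

theorem chars_strip_rstrip (l : List Char) :
    PySem.Chars.strip (PySem.Chars.rstrip l) = PySem.Chars.strip l := by
  simp only [PySem.Chars.strip]
  induction l with
  | nil => rfl
  | cons x xs ih =>
    by_cases h : PySem.Chars.isspace x = true
    · rw [rstrip_cons_space x xs h]
      by_cases hn : PySem.Chars.rstrip xs = []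
      · have hl : PySem.Chars.lstrip (x :: xs) = [] := by
          simp only [List.dropWhile_eq_nil_iff, PySem.Chars.lstrip]
          intro a ha
          rcases List.mem_cons.mp ha with rfl | ha'
          · exact h
          · exact (rstrip_eq_nil_iff xs).mp hn a ha'
        rw [if_pos hn, hl]
        rfl
      · rw [if_neg hn]
        simp only [PySem.Chars.lstrip, List.dropWhile, h] at ih ⊢
        exact ih
    · replace h : PySem.Chars.isspace x = false := by
        cases hx : PySem.Chars.isspace x <;> simp [hx] at h ⊢
      rw [rstrip_cons_not x xs h]
      simp only [PySem.Chars.lstrip, List.dropWhile, h]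
      rw [rstrip_cons_not x _ h, rstrip_cons_not x _ h, rstrip_idem]

-- Python: s.rstrip().strip() == s.strip()
theorem strip_rstrip (s : String) :
    PySem.Str.strip (PySem.Str.rstrip s) = PySem.Str.strip s := by
  apply String.toList_inj.mp
  simp only [PySem.Str.toList_strip, PySem.Str.toList_rstrip]
  exact chars_strip_rstrip s.toList

-- A's second loop is "rstrip the lines up to the first header"
theorem bodyA_takeWhile (l : List String) :
    pvBodyA l =
      (l.takeWhile (fun r => !(PySem.Set.contains pvHeaders (PySem.Str.strip r)))).map
        PySem.Str.rstrip := by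
  induction l with
  | nil => rfl
  | cons raw rest ih =>
    simp only [pvBodyA, strip_rstrip, List.takeWhile]
    by_cases h : PySem.Str.strip raw ∈ pvHeaders
    · simp [PySem.Set.contains, h]
    · simp [PySem.Set.contains, h, ih]

-- A's enumerate counter only shifts the reported index
theorem findStartA_shift (l : List String) (idx : Nat) :
    pvFindStartA l idx = (pvFindStartA l 0).map (· + idx) := by
  induction l generalizing idx with
  | nil => rfl
  | cons raw rest ih =>
    simp only [pvFindStartA]
    split
    · simp [Nat.add_comm]
    · rw [ih (idx + 1), ih 1]
      cases pvFindStartA rest 0 <;> (simp; try omega)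

-- what B's ans component equals, stated through A's two loops
def pvAnsSpec (l : List String) : Option (List String) :=
  match pvFindStartA l 0 with
  | none => none
  | some s => some (pvBodyA (l.drop s))

-- the reverse fold computes: seg = reversed rstripped prefix before the first
-- header, ans = A's body at the first marker
theorem foldB_spec (l : List String) :
    l.reverse.foldl pvStepB ([], none) =
      (((l.takeWhile (fun r => !(PySem.Set.contains pvHeaders (PySem.Str.strip r)))).map
          PySem.Str.rstrip).reverse,
       pvAnsSpec l) := by
  rw [List.foldl_reverse]
  induction l with
  | nil => rfl
  | cons raw rest ih =>
    rw [List.foldr_cons, ih]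
    by_cases h : PySem.Str.strip raw ∈ pvHeaders
    · by_cases hm : PySem.Str.strip raw = "TELEGRAM_MESSAGE:"
      · have hT : ("TELEGRAM_MESSAGE:" : String) ∈ pvHeaders := by decide
        simp [pvStepB, PySem.Set.contains, hm, hT, pvAnsSpec, pvFindStartA,
          List.takeWhile, bodyA_takeWhile]
      · simp only [pvStepB, PySem.Set.contains, pvAnsSpec, pvFindStartA, hm,
          List.takeWhile, findStartA_shift rest 1, if_false]
        cases pvFindStartA rest 0 <;> simp [h]
    · have hm : PySem.Str.strip raw ≠ "TELEGRAM_MESSAGE:" := by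
        intro he
        rw [he] at h
        exact h (by decide)
      simp only [pvStepB, PySem.Set.contains, pvAnsSpec, pvFindStartA, hm,
        List.takeWhile, findStartA_shift rest 1, if_false]
      cases pvFindStartA rest 0 <;> simp [h]

-- ===== VERDICT =====
theorem extract_send_ready_telegram_message_py_spec : Claim_equal_extract_send_ready_telegram_message_py := by
  intro l _
  show _ = _
  unfold extract_send_ready_telegram_message_py extract_send_ready_telegram_message_py_alt
  rw [foldB_spec]
  simp only [pvAnsSpec]
  cases h : pvFindStartA l 0 with
  | none => rfl
  | some s =>
      simp only []
      rw [PySem.List.slice_from_natCast]
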